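-- pv_equiv track=rewrite | github.com/benquick123/code-profiling | code/batch-1/vse-naloge-brez-testov/DN6-M-29.py | zadnji_tvit
-- ===== SOURCE A (Python) =====
-- import collections
--
-- def unikati(s):
--     rez = []
--     for i in s:
--         if i in rez:
--             pass
--         else:
--             rez.append(i)
--     return rez
--
-- def avtor(tvit):
--     novi = tvit.split(":")
--     return novi[0]
--
-- def vsi_avtorji(tviti):
--     p = []
--     for tvit in tviti:
--         a = avtor(tvit)
--         p.append(a)
--     p = unikati(p)
--     return p
--
-- def besedilo(tvit):
--     a = avtor(tvit)
--     od = a + ": "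
--     tv = tvit.lstrip(od)
--     return tv
--
-- def zadnji_tvit(tviti):
--     slovar = collections.defaultdict(int)
--     a = vsi_avtorji(tviti)
--     for ime in a:
--         for tvit in tviti:
--             if avtor(tvit) == ime:
--                 slovar[ime] = besedilo(tvit)
--     return slovar
-- ===== SOURCE B (Python) =====
-- import collections
--
-- def avtor(tvit):
--     novi = tvit.split(":")
--     return novi[0]
--
-- def besedilo(tvit):
--     a = avtor(tvit)
--     od = a + ": "
--     tv = tvit.lstrip(od)
--     return tv
--
-- def zadnji_tvit(tviti):
--     texts = collections.defaultdict(list)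
--     for tvit in tviti:
--         texts[avtor(tvit)].append(besedilo(tvit))
--     rez = collections.defaultdict(int)
--     for ime, ts in texts.items():
--         rez[ime] = ts[-1]
--     return rez
-- ===== Notes on version B (the rewrite author's own statement) =====
-- stated objective: faster
-- what changed: B replaces A's per-author rescan of all tweets (collect unique authors, then scan the whole list once per author) with a single indexing pass that groups texts per author in a defaultdict(list) and a second pass taking each list's last element.
import Mathlib
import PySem

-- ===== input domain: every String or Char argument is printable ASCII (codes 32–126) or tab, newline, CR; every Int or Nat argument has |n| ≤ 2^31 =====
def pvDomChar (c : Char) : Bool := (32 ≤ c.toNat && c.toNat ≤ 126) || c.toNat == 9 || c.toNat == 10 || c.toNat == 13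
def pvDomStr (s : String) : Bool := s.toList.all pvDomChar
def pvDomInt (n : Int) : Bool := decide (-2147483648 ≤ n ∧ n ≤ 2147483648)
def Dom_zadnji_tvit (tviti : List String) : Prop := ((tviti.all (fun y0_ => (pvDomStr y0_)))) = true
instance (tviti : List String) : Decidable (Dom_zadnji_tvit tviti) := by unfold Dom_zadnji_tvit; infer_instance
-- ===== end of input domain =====

-- B replaces A's per-author rescan of the whole tweet list with one grouping pass
-- (author -> list of texts) plus a pass taking each list's last element: O(n·m) -> O(n).

-- ===== PORT A =====
-- avtor(tvit): tvit.split(":")[0]; the split list is never empty, so the [0] lookup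
-- never raises; the .getD "" default is unreachable.
def pyAvtor (tvit : String) : String :=
  (PySem.List.pyGet? ((PySem.Str.split? tvit ":").getD []) 0).getD ""

-- besedilo(tvit): tvit.lstrip(a + ": ") — Python's lstrip(chars) drops leading chars
-- that occur anywhere in chars; ported by hand as dropWhile of membership (exact).
def pyBesedilo (tvit : String) : String :=
  let a := pyAvtor tvit
  let od := a ++ ": "
  String.ofList (tvit.toList.dropWhile (fun c => od.toList.contains c))

def unikatiA (s : List String) : List String :=
  s.foldl (fun rez i => if rez.contains i then rez else rez ++ [i]) []

def vsiAvtorjiA (tviti : List String) : List String :=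
  unikatiA (tviti.foldl (fun p t => p ++ [pyAvtor t]) [])

def zadnji_tvit (tviti : List String) : List (String × String) :=
  ((vsiAvtorjiA tviti).foldl
    (fun d ime => tviti.foldl
      (fun d t => if pyAvtor t == ime then d.insert ime (pyBesedilo t) else d) d)
    (PySem.Dict.empty : PySem.Dict String String)).items

-- ===== PORT B =====
-- ts[-1]: the grouped lists are never empty, so the IndexError default "" is unreachable.
def zadnji_tvit_alt (tviti : List String) : List (String × String) :=
  let texts := tviti.foldl
    (fun d t => d.modify (pyAvtor t) [] (· ++ [pyBesedilo t]))
    (PySem.Dict.empty : PySem.Dict String (List String))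
  let rez := texts.items.foldl
    (fun d p => d.insert p.1 ((PySem.List.pyGet? p.2 (-1)).getD ""))
    (PySem.Dict.empty : PySem.Dict String String)
  rez.items

-- ===== PRECONDITION & SPEC =====
def Spec_zadnji_tvit (tviti : List String) (out : List (String × String)) : Prop := out = zadnji_tvit_alt tviti
instance (tviti : List String) (out : List (String × String)) : Decidable (Spec_zadnji_tvit tviti out) := by unfold Spec_zadnji_tvit; infer_instance

-- ===== CLAIM (what is proved, stated in full; the proofs are below) =====
def Claim_equal_zadnji_tvit : Prop := ∀ (tviti : List String), Dom_zadnji_tvit tviti → Spec_zadnji_tvit tviti (zadnji_tvit tviti)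

-- ===== LEMMAS AND PROOFS =====

-- the text A/B associate to author k: besedilo of the last tweet of author k
def lastText (tviti : List String) (k : String) : String :=
  ((tviti.filter (fun t => pyAvtor t == k)).map pyBesedilo).getLastD ""

theorem unikatiA_eq_ofList (s : List String) : unikatiA s = PySem.Set.ofList s := by
  rw [PySem.Set.ofList_eq_foldl]
  unfold unikatiA
  apply PySem.List.foldl_congr_mem
  intro rez i _
  simp [PySem.Set.add, PySem.Set.contains]

theorem foldl_append_map (l : List String) (acc : List String) :
    l.foldl (fun p t => p ++ [pyAvtor t]) acc = acc ++ l.map pyAvtor := by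
  induction l generalizing acc with
  | nil => simp
  | cons t l ih => simp [List.foldl_cons, ih]

theorem getLastD_default_irrel {α : Type} (l : List α) (h : l ≠ []) (a b : α) :
    l.getLastD a = l.getLastD b := by
  cases l with
  | nil => exact absurd rfl h
  | cons x xs => rw [List.getLastD_cons, List.getLastD_cons]

theorem inner_fold_nil (l : List String) (ime : String) (d : PySem.Dict String String)
    (h : l.filter (fun t => pyAvtor t == ime) = []) :
    l.foldl (fun d t => if pyAvtor t == ime then d.insert ime (pyBesedilo t) else d) d = d := by
  induction l generalizing d with
  | nil => rfl
  | cons t l ih =>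
    rw [List.filter_cons] at h
    by_cases hm : (pyAvtor t == ime) = true
    · simp [hm] at h
    · simp only [hm] at h
      simp only [List.foldl_cons, hm]
      exact ih d h

theorem inner_fold_eq (l : List String) (ime : String) (d : PySem.Dict String String)
    (h : l.filter (fun t => pyAvtor t == ime) ≠ []) :
    l.foldl (fun d t => if pyAvtor t == ime then d.insert ime (pyBesedilo t) else d) d
      = d.insert ime (lastText l ime) := by
  induction l generalizing d with
  | nil => exact absurd rfl h
  | cons t l ih =>
    unfold lastText
    rw [List.filter_cons]
    by_cases hm : (pyAvtor t == ime) = true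
    · simp only [hm, if_true, List.foldl_cons, List.map_cons]
      by_cases hl : l.filter (fun t => pyAvtor t == ime) = []
      · rw [inner_fold_nil l ime _ hl, hl]
        rfl
      · rw [ih _ hl, PySem.Dict.insert_insert_self, List.getLastD_cons]
        unfold lastText
        congr 1
        have hm' : (l.filter (fun t => pyAvtor t == ime)).map pyBesedilo ≠ [] := by
          simp [hl]
        exact (getLastD_default_irrel _ hm' _ _).symm
    · have h' : l.filter (fun t => pyAvtor t == ime) ≠ [] := by
        rw [List.filter_cons] at h
        simpa [hm] using h
      simp only [List.foldl_cons, hm, Bool.false_eq_true, if_false]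
      rw [ih d h']
      unfold lastText
      rfl

theorem a_items (tviti : List String) :
    zadnji_tvit tviti
      = (PySem.Set.ofList (tviti.map pyAvtor)).map (fun k => (k, lastText tviti k)) := by
  unfold zadnji_tvit vsiAvtorjiA
  rw [foldl_append_map, unikatiA_eq_ofList, List.nil_append]
  have hcongr : (PySem.Set.ofList (tviti.map pyAvtor)).foldl
      (fun d ime => tviti.foldl
        (fun d t => if pyAvtor t == ime then d.insert ime (pyBesedilo t) else d) d)
      (PySem.Dict.empty : PySem.Dict String String)
      = (PySem.Set.ofList (tviti.map pyAvtor)).foldl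
        (fun d ime => d.insert ime (lastText tviti ime)) PySem.Dict.empty := by
    apply PySem.List.foldl_congr_mem
    intro d ime hmem
    apply inner_fold_eq
    have hmm : ime ∈ tviti.map pyAvtor := (PySem.Set.mem_ofList _ _).mp hmem
    obtain ⟨t, ht, hav⟩ := List.mem_map.mp hmm
    intro hnil
    have : t ∈ tviti.filter (fun t => pyAvtor t == ime) :=
      List.mem_filter.mpr ⟨ht, by simp [hav]⟩
    rw [hnil] at this
    exact absurd this (List.not_mem_nil)
  rw [hcongr]
  rw [PySem.Dict.items_foldl_insert_fresh _ (fun ime => ime) (lastText tviti) _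
      (fun a _ => PySem.Dict.contains_empty a)
      (by simp)]
  rfl

theorem b_texts_items (tviti : List String) :
    (tviti.foldl (fun d t => d.modify (pyAvtor t) [] (· ++ [pyBesedilo t]))
        (PySem.Dict.empty : PySem.Dict String (List String))).items
      = (PySem.Set.ofList (tviti.map pyAvtor)).map
          (fun k => (k, (tviti.filter (fun t => pyAvtor t == k)).map pyBesedilo)) := by
  have hfold : tviti.foldl
      (fun d t => d.modify (pyAvtor t) [] (· ++ [pyBesedilo t]))
      (PySem.Dict.empty : PySem.Dict String (List String))
      = (tviti.map (fun t => (pyAvtor t, pyBesedilo t))).foldl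
        (fun d p => d.modify p.1 [] (· ++ [p.2])) PySem.Dict.empty := by
    rw [List.foldl_map]
  rw [hfold]
  have hnodup : ((tviti.map (fun t => (pyAvtor t, pyBesedilo t))).foldl
      (fun d p => d.modify p.1 [] (· ++ [p.2]))
      (PySem.Dict.empty : PySem.Dict String (List String))).keys.Nodup :=
    PySem.Dict.nodup_keys_foldl_modify_key _ (fun p : String × String => p.1) [] (fun _ p v => v ++ [p.2]) _
      (by simp [PySem.Dict.keys_empty])
  rw [PySem.Dict.items_eq_map_keys _ hnodup []]
  rw [PySem.Dict.keys_foldl_modify_key _ (fun p : String × String => p.1) [] (fun _ p v => v ++ [p.2])]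
  have hk : PySem.Set.update (PySem.Dict.empty : PySem.Dict String (List String)).keys
      ((tviti.map (fun t => (pyAvtor t, pyBesedilo t))).map (fun p : String × String => p.1))
      = PySem.Set.ofList (tviti.map pyAvtor) := by
    simp only [PySem.Dict.keys_empty, List.map_map, Function.comp_def]
    rfl
  rw [hk]
  apply List.map_congr_left
  intro k _
  rw [PySem.Dict.getD_foldl_modify_append, List.filter_map]
  simp [PySem.Dict.getD_empty, List.map_map, Function.comp_def]

theorem b_items (tviti : List String) :
    zadnji_tvit_alt tviti
      = (PySem.Set.ofList (tviti.map pyAvtor)).map (fun k => (k, lastText tviti k)) := by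
  show ((tviti.foldl (fun d t => d.modify (pyAvtor t) [] (· ++ [pyBesedilo t]))
        (PySem.Dict.empty : PySem.Dict String (List String))).items.foldl
      (fun d p => d.insert p.1 ((PySem.List.pyGet? p.2 (-1)).getD ""))
      (PySem.Dict.empty : PySem.Dict String String)).items = _
  rw [PySem.Dict.items_foldl_insert_fresh _ (fun p : String × List String => p.1)
      (fun p : String × List String => (PySem.List.pyGet? p.2 (-1)).getD "") _
      (fun a _ => PySem.Dict.contains_empty a.1)
      (by
        rw [b_texts_items]
        simp [List.map_map, Function.comp_def])]
  rw [b_texts_items]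
  rw [show (PySem.Dict.empty : PySem.Dict String String).items = [] from rfl,
      List.nil_append, List.map_map]
  apply List.map_congr_left
  intro k _
  simp only [Function.comp_def]
  rw [PySem.List.pyGet?_neg_one]
  unfold lastText
  rw [List.getLastD_eq_getLast?]

-- ===== VERDICT (by name: the statement is the Claim_ definition above) =====
theorem zadnji_tvit_spec : Claim_equal_zadnji_tvit := by
  intro tviti _
  unfold Spec_zadnji_tvit
  rw [a_items, b_items]
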